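-- pv_equiv track=rewrite | github.com/NairiAreg/MDSGene_backend | symptom_predictor.py | generate_full_feature_array
-- ===== SOURCE A (Python) =====
-- from typing import List, Dict
--
-- def generate_full_feature_array(
--         input_data: Dict[str, int],
--         all_features: List[str],
--         default_value: int
-- ) -> List[int]:
--     """
--     Generate a feature array for model prediction.
--
--     Args:
--         input_data: Dictionary of feature names and values
--         all_features: List of all possible feature names
--         default_value: Default value for missing features
--
--     Returns:
--         List of feature values in the order expected by the model
--     """
--     feature_array = [default_value] * len(all_features)
--
--     for feature, value in input_data.items():
--         normalized_feature = feature.replace(" ", "_")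
--
--         # Match feature by prefix in all_features
--         matching_indices = [
--             i for i, f in enumerate(all_features)
--             if f.startswith(normalized_feature)
--         ]
--
--         for index in matching_indices:
--             feature_array[index] = value
--
--     return feature_array
-- ===== SOURCE B (Python) =====
-- def generate_full_feature_array(input_data, all_features, default_value):
--     # Hash index of normalized input features -> (position, value); each output
--     # feature then probes only its own prefixes, so the scan over the whole
--     # input per feature disappears.
--     index = {}
--     for pos, (feature, value) in enumerate(input_data.items()):
--         index[feature.replace(" ", "_")] = (pos, value)
--     result = []
--     for f in all_features:
--         best = None
--         for k in range(len(f) + 1):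
--             entry = index.get(f[:k])
--             if entry is not None and (best is None or entry[0] > best[0]):
--                 best = entry
--         result.append(default_value if best is None else best[1])
--     return result
-- ===== Notes on version B (the rewrite author's own statement) =====
-- stated objective: faster
-- what changed: Instead of scanning all_features once per input feature (writing matches into a preallocated array), B builds a hash index from normalized input feature names to (position, value) and, for each feature in all_features, looks up only that feature's own prefixes, keeping the entry of the latest input position; the per-feature scan over the whole input disappears.
import Mathlib
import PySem

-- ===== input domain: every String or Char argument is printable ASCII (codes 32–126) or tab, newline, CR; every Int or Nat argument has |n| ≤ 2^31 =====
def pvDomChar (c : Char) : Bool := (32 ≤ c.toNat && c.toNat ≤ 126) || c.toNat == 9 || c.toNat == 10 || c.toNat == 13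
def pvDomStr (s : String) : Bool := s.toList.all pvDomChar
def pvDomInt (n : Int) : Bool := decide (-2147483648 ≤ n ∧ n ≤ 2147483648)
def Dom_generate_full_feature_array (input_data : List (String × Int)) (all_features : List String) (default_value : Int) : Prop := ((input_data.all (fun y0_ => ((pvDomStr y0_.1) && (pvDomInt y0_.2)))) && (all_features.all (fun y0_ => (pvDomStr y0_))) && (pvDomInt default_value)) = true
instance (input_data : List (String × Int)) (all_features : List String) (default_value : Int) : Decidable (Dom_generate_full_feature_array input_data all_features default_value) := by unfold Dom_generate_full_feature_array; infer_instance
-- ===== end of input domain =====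

-- B replaces A's per-input-feature scan of all_features by a hash index of the
-- normalized input features probed with each feature's prefixes (alternative algorithm).

-- ===== PORT A =====
def generate_full_feature_array (input_data : List (String × Int)) (all_features : List String) (default_value : Int) : List Int :=
  input_data.foldl
    (fun feature_array p =>
      let normalized_feature := PySem.Str.replace p.1 " " "_"
      let matching_indices :=
        ((PySem.List.enumerate all_features 0).filter
          (fun q => PySem.Str.startswith q.2 normalized_feature)).map (fun q => q.1)
      matching_indices.foldl (fun arr index => PySem.List.pySetD arr index p.2) feature_array)
    (List.replicate all_features.length default_value)

-- ===== PORT B =====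
def generate_full_feature_array_alt (input_data : List (String × Int)) (all_features : List String) (default_value : Int) : List Int :=
  let index : PySem.Dict String (Int × Int) :=
    (PySem.List.enumerate input_data 0).foldl
      (fun d p => d.insert (PySem.Str.replace p.2.1 " " "_") (p.1, p.2.2))
      PySem.Dict.empty
  all_features.foldl
    (fun result f =>
      let best :=
        (PySem.List.pyRange 0 (PySem.Str.len f + 1) 1).foldl
          (fun best k =>
            match PySem.Dict.get? index (PySem.Str.slice f none (some k)), best with
            | some entry, none => some entry
            | some entry, some b => if entry.1 > b.1 then some entry else best
            | none, _ => best)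
          none
      result ++ [match best with | none => default_value | some b => b.2])
    []

-- ===== PRECONDITION & SPEC =====
def Spec_generate_full_feature_array (input_data : List (String × Int)) (all_features : List String) (default_value : Int) (out : List Int) : Prop := out = generate_full_feature_array_alt input_data all_features default_value
instance (input_data : List (String × Int)) (all_features : List String) (default_value : Int) (out : List Int) : Decidable (Spec_generate_full_feature_array input_data all_features default_value out) := by unfold Spec_generate_full_feature_array; infer_instance

-- ===== CLAIM (what is proved, stated in full; the proofs are below) =====
def Claim_equal_generate_full_feature_array : Prop := ∀ (input_data : List (String × Int)) (all_features : List String) (default_value : Int), Dom_generate_full_feature_array input_data all_features default_value → Spec_generate_full_feature_array input_data all_features default_value (generate_full_feature_array input_data all_features default_value)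

-- ===== LEMMAS AND PROOFS =====

-- normalized feature name
def pvNorm (s : String) : String := PySem.Str.replace s " " "_"

-- input items, enumerated and normalized: (normalized name, (position, value))
def pvItems (l : List (String × Int)) : List (String × (Int × Int)) :=
  (PySem.List.enumerate l 0).map (fun p => (pvNorm p.2.1, (p.1, p.2.2)))

-- the value both programs put at the slot of feature f: the value of the LAST
-- input item whose normalized name is a prefix of f, else the default
def pvVal (l : List (String × Int)) (f : String) (dflt : Int) : Int :=
  match l.reverse.find? (fun p => PySem.Str.startswith f (pvNorm p.1)) with
  | some p => p.2
  | none => dflt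

-- ---- A side ----

theorem pv_setfold_len (idxs : List Int) (v : Int) : ∀ (arr : List Int),
    (idxs.foldl (fun a j => PySem.List.pySetD a j v) arr).length = arr.length := by
  induction idxs with
  | nil => intro arr; rfl
  | cons j rest ih => intro arr; simp [List.foldl_cons, ih, PySem.List.length_pySetD]

theorem pv_setfold_get (idxs : List Int) (v : Int) : ∀ (arr : List Int) (i : Nat),
    (∀ j ∈ idxs, 0 ≤ j) → i < arr.length →
    (idxs.foldl (fun a j => PySem.List.pySetD a j v) arr)[i]? =
      if (i : Int) ∈ idxs then some v else arr[i]? := by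
  induction idxs with
  | nil => intro arr i _ _; simp
  | cons j rest ih =>
    intro arr i hnn hi
    have hj : 0 ≤ j := hnn j (List.mem_cons_self)
    have hset : PySem.List.pySetD arr j v = arr.set j.toNat v := by
      rw [PySem.List.pySetD_of_nonneg]; exact hj
    rw [List.foldl_cons, hset, ih (arr.set j.toNat v) i (fun x hx => hnn x (List.mem_cons_of_mem _ hx)) (by simpa using hi)]
    by_cases hmem : (i : Int) ∈ rest
    · simp [hmem]
    · by_cases hji : j = (i : Int)
      · have h2 : j.toNat = i := by omega
        simp [hmem, hji, hi]
      · have h2 : j.toNat ≠ i := by omega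
        have h3 : ¬((i : Int) = j) := fun h => hji h.symm
        simp [hmem, h3, h2]

theorem pv_idx_mem (feats : List String) (nf : String) (i : Nat) (hi : i < feats.length) :
    ((i : Int) ∈ ((PySem.List.enumerate feats 0).filter
        (fun q => PySem.Str.startswith q.2 nf)).map (fun q => q.1)) ↔
      PySem.Str.startswith feats[i] nf = true := by
  simp only [List.mem_map, List.mem_filter, PySem.List.mem_enumerate_iff]
  constructor
  · rintro ⟨q, ⟨⟨k, hk, rfl⟩, hsw⟩, hq⟩
    simp only [zero_add] at hq hsw
    have : k = i := by exact_mod_cast hq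
    subst this; exact hsw
  · intro h
    exact ⟨((i : Int), feats[i]), ⟨⟨i, hi, by simp⟩, h⟩, rfl⟩

theorem pv_idx_nonneg (feats : List String) (nf : String) (j : Int)
    (hj : j ∈ ((PySem.List.enumerate feats 0).filter
        (fun q => PySem.Str.startswith q.2 nf)).map (fun q => q.1)) : 0 ≤ j := by
  simp only [List.mem_map, List.mem_filter, PySem.List.mem_enumerate_iff] at hj
  rcases hj with ⟨q, ⟨⟨k, hk, rfl⟩, _⟩, hq⟩
  simp only [zero_add] at hq
  omega

theorem pv_A_len (l : List (String × Int)) (feats : List String) : ∀ (arr : List Int),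
    (l.foldl
      (fun feature_array p =>
        let normalized_feature := PySem.Str.replace p.1 " " "_"
        let matching_indices :=
          ((PySem.List.enumerate feats 0).filter
            (fun q => PySem.Str.startswith q.2 normalized_feature)).map (fun q => q.1)
        matching_indices.foldl (fun arr index => PySem.List.pySetD arr index p.2) feature_array)
      arr).length = arr.length := by
  intro arr
  induction l generalizing arr with
  | nil => rfl
  | cons p l ih =>
    rw [List.foldl_cons]
    exact (ih _).trans (pv_setfold_len _ _ _)

theorem pv_A_get (l : List (String × Int)) (feats : List String) :
    ∀ (arr : List Int), arr.length = feats.length → ∀ (i : Nat) (hi : i < feats.length),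
    (l.foldl
      (fun feature_array p =>
        let normalized_feature := PySem.Str.replace p.1 " " "_"
        let matching_indices :=
          ((PySem.List.enumerate feats 0).filter
            (fun q => PySem.Str.startswith q.2 normalized_feature)).map (fun q => q.1)
        matching_indices.foldl (fun arr index => PySem.List.pySetD arr index p.2) feature_array)
      arr)[i]? =
      match l.reverse.find? (fun p => PySem.Str.startswith feats[i] (pvNorm p.1)) with
      | some p => some p.2
      | none => arr[i]? := by
  induction l with
  | nil => intro arr _ i hi; simp
  | cons p l ih =>
    intro arr hlen i hi
    rw [List.foldl_cons]
    set nf := PySem.Str.replace p.1 " " "_" with hnf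
    set idxs := ((PySem.List.enumerate feats 0).filter
            (fun q => PySem.Str.startswith q.2 nf)).map (fun q => q.1) with hidxs
    have hinner : (idxs.foldl (fun arr index => PySem.List.pySetD arr index p.2) arr).length = feats.length :=
      (pv_setfold_len _ _ _).trans hlen
    rw [ih _ hinner i hi]
    rw [List.reverse_cons, List.find?_append]
    cases h : l.reverse.find? (fun q => PySem.Str.startswith feats[i] (pvNorm q.1)) with
    | some q => simp
    | none =>
      simp only [Option.none_or]
      rw [pv_setfold_get idxs p.2 arr i (fun j hj => pv_idx_nonneg feats nf j hj) (by omega)]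
      rw [List.find?_singleton]
      by_cases hsw : PySem.Str.startswith feats[i] (pvNorm p.1) = true
      · have hsw' : PySem.Chars.startswith feats[i].toList (pvNorm p.1).toList = true := by
          simpa using hsw
        have : (i : Int) ∈ idxs := (pv_idx_mem feats nf i hi).mpr hsw
        simp [this, hsw']
      · have : (i : Int) ∉ idxs := fun hc => hsw ((pv_idx_mem feats nf i hi).mp hc)
        have hsw' : PySem.Chars.startswith feats[i].toList (pvNorm p.1).toList = false := by
          simpa using hsw
        simp [this, hsw']

theorem pv_A_eq (l : List (String × Int)) (feats : List String) (dflt : Int) :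
    generate_full_feature_array l feats dflt = feats.map (fun f => pvVal l f dflt) := by
  apply List.ext_getElem?_iff.mpr
  intro i
  by_cases hi : i < feats.length
  · rw [show generate_full_feature_array l feats dflt =
        (l.foldl
          (fun feature_array p =>
            let normalized_feature := PySem.Str.replace p.1 " " "_"
            let matching_indices :=
              ((PySem.List.enumerate feats 0).filter
                (fun q => PySem.Str.startswith q.2 normalized_feature)).map (fun q => q.1)
            matching_indices.foldl (fun arr index => PySem.List.pySetD arr index p.2) feature_array)
          (List.replicate feats.length dflt)) from rfl]
    rw [pv_A_get l feats _ (by simp) i hi]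
    rw [List.getElem?_map]
    simp only [List.getElem?_eq_getElem hi, Option.map_some, pvVal]
    cases h : l.reverse.find? (fun p => PySem.Str.startswith feats[i] (pvNorm p.1)) with
    | some q => simp
    | none => simp [hi]
  · have h1 : (generate_full_feature_array l feats dflt).length = feats.length := by
      unfold generate_full_feature_array
      rw [pv_A_len]; simp
    rw [List.getElem?_eq_none (by omega), List.getElem?_eq_none (by simpa using by omega)]

-- ---- B side ----

theorem pv_dict_get (ps : List (String × (Int × Int))) : ∀ (d : PySem.Dict String (Int × Int)) (key : String),
    (ps.foldl (fun d p => d.insert p.1 p.2) d).get? key =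
      match ps.reverse.find? (fun p => p.1 == key) with
      | some p => some p.2
      | none => d.get? key := by
  induction ps with
  | nil => intro d key; simp
  | cons p ps ih =>
    intro d key
    rw [List.foldl_cons, ih, List.reverse_cons, List.find?_append]
    cases h : ps.reverse.find? (fun p => p.1 == key) with
    | some q => simp
    | none =>
      rw [List.find?_singleton]
      by_cases hk : p.1 = key
      · simp [hk, PySem.Dict.get?_insert_self]
      · have hb : (p.1 == key) = false := by simp [hk]
        rw [PySem.Dict.get?_insert]
        have h2 : ¬ key = p.1 := fun hc => hk hc.symm
        simp [hb, h2]

theorem pv_last_max (ps : List (String × (Int × Int))) (pred : (String × (Int × Int)) → Bool)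
    (hinc : ps.Pairwise (fun a b => a.2.1 < b.2.1)) (p : String × (Int × Int))
    (h : ps.reverse.find? pred = some p) :
    p ∈ ps ∧ pred p = true ∧ ∀ q ∈ ps, pred q = true → q.2.1 ≤ p.2.1 := by
  induction ps using List.reverseRecOn generalizing p with
  | nil => simp at h
  | append_singleton ps x ih =>
    rw [List.pairwise_append] at hinc
    obtain ⟨h1, _, h3⟩ := hinc
    rw [List.reverse_append, List.reverse_singleton, List.singleton_append, List.find?_cons] at h
    by_cases hx : pred x = true
    · rw [hx] at h
      simp only [Option.some.injEq] at h
      subst h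
      refine ⟨by simp, hx, ?_⟩
      intro q hq _
      rcases List.mem_append.mp hq with hq | hq
      · exact le_of_lt (h3 q hq x (by simp))
      · simp at hq; subst hq; exact le_refl _
    · simp only [Bool.not_eq_true] at hx
      rw [hx] at h
      obtain ⟨hmem, hpred, hmax⟩ := ih h1 p h
      refine ⟨List.mem_append.mpr (Or.inl hmem), hpred, ?_⟩
      intro q hq hpq
      rcases List.mem_append.mp hq with hq | hq
      · exact hmax q hq hpq
      · simp at hq; subst hq; rw [hpq] at hx; cases hx

theorem pv_items_mem (l : List (String × Int)) (p : String × (Int × Int)) (hp : p ∈ pvItems l) :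
    ∃ k : Nat, ∃ hk : k < l.length, p = (pvNorm (l[k].1), ((k : Int), l[k].2)) := by
  simp only [pvItems, List.mem_map, PySem.List.mem_enumerate_iff] at hp
  obtain ⟨q, ⟨k, hk, hq⟩, rfl⟩ := hp
  exact ⟨k, hk, by rw [hq]; simp⟩

theorem pv_items_inj (l : List (String × Int)) (p q : String × (Int × Int))
    (hp : p ∈ pvItems l) (hq : q ∈ pvItems l) (h : p.2.1 = q.2.1) : p = q := by
  obtain ⟨k, hk, rfl⟩ := pv_items_mem l p hp
  obtain ⟨m, hm, rfl⟩ := pv_items_mem l q hq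
  simp only at h
  have : k = m := by exact_mod_cast h
  subst this; rfl

theorem pv_items_pairwise (l : List (String × Int)) :
    (pvItems l).Pairwise (fun a b => a.2.1 < b.2.1) := by
  unfold pvItems
  rw [List.pairwise_map]
  exact PySem.List.pairwise_lt_enumerate l 0

theorem pv_find_enumerate (l : List (String × Int)) (pred : (String × Int) → Bool) : ∀ (s : Int),
    ((PySem.List.enumerate l s).reverse.find? (fun q => pred q.2)).map (fun q => q.2) =
      l.reverse.find? pred := by
  induction l with
  | nil => intro s; simp [PySem.List.enumerate_nil]
  | cons p l ih =>
    intro s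
    rw [PySem.List.enumerate_cons, List.reverse_cons, List.reverse_cons,
      List.find?_append, List.find?_append, Option.map_or, ih]
    congr 1
    rw [List.find?_singleton, List.find?_singleton]
    by_cases h : pred p = true <;> simp [h]

theorem pv_val_items (l : List (String × Int)) (f : String) (dflt : Int) :
    pvVal l f dflt =
      match (pvItems l).reverse.find? (fun p => PySem.Str.startswith f p.1) with
      | some p => p.2.2
      | none => dflt := by
  have h1 : (pvItems l).reverse.find? (fun p => PySem.Str.startswith f p.1)
      = ((PySem.List.enumerate l 0).reverse.find?
          (fun q => PySem.Str.startswith f (pvNorm q.2.1))).map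
            (fun p => (pvNorm p.2.1, (p.1, p.2.2))) := by
    unfold pvItems
    rw [← List.map_reverse, List.find?_map]
    rfl
  have h2 := pv_find_enumerate l (fun p => PySem.Str.startswith f (pvNorm p.1)) 0
  unfold pvVal
  rw [← h2, h1]
  cases h : (PySem.List.enumerate l 0).reverse.find?
      (fun q => PySem.Str.startswith f (pvNorm q.2.1)) with
  | none => rfl
  | some q => rfl

theorem pv_startswith_slice (f : String) (k : Int) (hk : 0 ≤ k) :
    PySem.Str.startswith f (PySem.Str.slice f none (some k)) = true := by
  have ht : (PySem.Str.slice f none (some k)).toList = f.toList.take k.toNat := by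
    rw [PySem.Str.toList_slice]
    exact PySem.List.slice_to _ hk
  simp only [PySem.Str.startswith_eq, ht]
  exact (PySem.Chars.startswith_iff _ _).mpr (List.take_prefix _ _)

theorem pv_slice_of_prefix (f key : String) (h : PySem.Str.startswith f key = true) :
    PySem.Str.slice f none (some (PySem.Str.len key)) = key ∧
      0 ≤ PySem.Str.len key ∧ PySem.Str.len key < PySem.Str.len f + 1 := by
  have hpre : key.toList <+: f.toList := by
    simpa only [PySem.Str.startswith_eq] using (PySem.Chars.startswith_iff _ _).mp h
  have hlen : key.toList.length ≤ f.toList.length := hpre.length_le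
  have htake : key.toList = f.toList.take key.toList.length := List.prefix_iff_eq_take.mp hpre
  have hk : PySem.Str.len key = (key.toList.length : Int) := by simp [PySem.Str.len_eq]
  refine ⟨?_, by omega, by rw [PySem.Str.len_eq, PySem.Str.len_eq]; omega⟩
  apply String.toList_inj.mp
  rw [PySem.Str.toList_slice, hk]
  rw [show PySem.Chars.slice f.toList none (some (key.toList.length : Int)) = f.toList.take ((key.toList.length : Int)).toNat from PySem.List.slice_to _ (by omega)]
  rw [Int.toNat_natCast]
  exact htake.symm

theorem pv_bf_none (C : List (Int × Int)) : ∀ (b : Option (Int × Int)),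
    C.foldl (fun b e => match b with
      | none => some e
      | some bb => if e.1 > bb.1 then some e else b) b = none → b = none ∧ C = [] := by
  induction C with
  | nil => intro b h; exact ⟨h, rfl⟩
  | cons c C ih =>
    intro b h
    rw [List.foldl_cons] at h
    rcases ih _ h with ⟨h1, -⟩
    exfalso
    cases b with
    | none => simp at h1
    | some bb => by_cases hgt : c.1 > bb.1 <;> simp [hgt] at h1

theorem pv_bf_some (C : List (Int × Int)) : ∀ (b : Option (Int × Int)) (e : Int × Int),
    C.foldl (fun b e => match b with
      | none => some e
      | some bb => if e.1 > bb.1 then some e else b) b = some e →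
    (e ∈ C ∨ b = some e) ∧ (∀ e' ∈ C, e'.1 ≤ e.1) ∧ (∀ bb, b = some bb → bb.1 ≤ e.1) := by
  induction C with
  | nil =>
    intro b e h
    simp only [List.foldl_nil] at h
    exact ⟨Or.inr h, by simp, fun bb hbb => by rw [hbb] at h; injection h with h'; rw [h']⟩
  | cons c C ih =>
    intro b e h
    rw [List.foldl_cons] at h
    obtain ⟨hmem, hub, hb⟩ := ih _ _ h
    have hx : ∃ x, (match b with
        | none => some c
        | some bb => if c.1 > bb.1 then some c else b) = some x ∧ (x = c ∨ b = some x) ∧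
        c.1 ≤ x.1 ∧ (∀ bb, b = some bb → bb.1 ≤ x.1) := by
      cases b with
      | none => exact ⟨c, rfl, Or.inl rfl, le_refl _, by simp⟩
      | some bb =>
        by_cases hgt : c.1 > bb.1
        · exact ⟨c, by simp [hgt], Or.inl rfl, le_refl _,
            fun bb' hbb' => by injection hbb' with h'; rw [← h']; omega⟩
        · exact ⟨bb, by simp [hgt], Or.inr rfl, by omega,
            fun bb' hbb' => by injection hbb' with h'; rw [← h']⟩
    obtain ⟨x, hxeq, hxor, hcx, hbx⟩ := hx
    have hxe : x.1 ≤ e.1 := hb x hxeq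
    refine ⟨?_, ?_, ?_⟩
    · rcases hmem with hm | hm
      · exact Or.inl (List.mem_cons_of_mem _ hm)
      · rw [hxeq] at hm
        injection hm with h'
        subst h'
        rcases hxor with h' | h'
        · exact Or.inl (h' ▸ List.mem_cons_self)
        · exact Or.inr h'
    · intro e' he'
      rcases List.mem_cons.mp he' with rfl | he'
      · omega
      · exact hub e' he'
    · intro bb hbb
      have := hbx bb hbb
      omega

theorem pv_fold_bridge (candf : Int → Option (Int × Int)) : ∀ (ks : List Int) (b : Option (Int × Int)),
    ks.foldl (fun best k => match candf k, best with
      | some entry, none => some entry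
      | some entry, some b => if entry.1 > b.1 then some entry else best
      | none, _ => best) b
    = (ks.filterMap candf).foldl (fun b e => match b with
      | none => some e
      | some bb => if e.1 > bb.1 then some e else b) b := by
  intro ks
  induction ks with
  | nil => intro b; rfl
  | cons k ks ih =>
    intro b
    rw [List.foldl_cons, List.filterMap_cons]
    cases hc : candf k with
    | none => rw [ih]
    | some e =>
      rw [List.foldl_cons, ih]
      congr 1
      cases b <;> rfl

theorem pv_B_core (l : List (String × Int)) (f : String) (dflt : Int)
    (d : PySem.Dict String (Int × Int))
    (hd : ∀ key, d.get? key =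
      ((pvItems l).reverse.find? (fun p => p.1 == key)).map (fun p => p.2)) :
    (match
      (PySem.List.pyRange 0 (PySem.Str.len f + 1) 1).foldl
        (fun best k =>
          match PySem.Dict.get? d (PySem.Str.slice f none (some k)), best with
          | some entry, none => some entry
          | some entry, some b => if entry.1 > b.1 then some entry else best
          | none, _ => best)
        none with
      | none => dflt
      | some b => b.2) = pvVal l f dflt := by
  have hsound : ∀ k e, k ∈ PySem.List.pyRange 0 (PySem.Str.len f + 1) 1 →
      PySem.Dict.get? d (PySem.Str.slice f none (some k)) = some e →
      ∃ q, q ∈ pvItems l ∧ PySem.Str.startswith f q.1 = true ∧ q.2 = e := by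
    intro k e hk he
    rw [hd] at he
    rcases Option.map_eq_some_iff.mp he with ⟨q, hfind, rfl⟩
    have hq1 : q ∈ pvItems l := List.mem_reverse.mp (List.mem_of_find?_eq_some hfind)
    have hq2 := List.find?_some hfind
    have hq3 : q.1 = PySem.Str.slice f none (some k) := by simpa using hq2
    have hk0 : 0 ≤ k := ((PySem.List.mem_pyRange_one).mp hk).1
    exact ⟨q, hq1, by rw [hq3]; exact pv_startswith_slice f k hk0, rfl⟩
  rw [pv_fold_bridge (fun k => PySem.Dict.get? d (PySem.Str.slice f none (some k))),
    pv_val_items l f dflt]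
  cases hF : (pvItems l).reverse.find? (fun p => PySem.Str.startswith f p.1) with
  | none =>
    have hCnil : (PySem.List.pyRange 0 (PySem.Str.len f + 1) 1).filterMap
        (fun k => PySem.Dict.get? d (PySem.Str.slice f none (some k))) = [] := by
      rw [List.filterMap_eq_nil_iff]
      intro k hk
      cases hc : PySem.Dict.get? d (PySem.Str.slice f none (some k)) with
      | none => rfl
      | some e =>
        obtain ⟨q, hq1, hq2, -⟩ := hsound k e hk hc
        have := List.find?_eq_none.mp hF q (List.mem_reverse.mpr hq1)
        rw [hq2] at this
        cases this rfl
    rw [hCnil]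
    rfl
  | some p =>
    obtain ⟨hpmem, hppred, hpmax⟩ := pv_last_max _ _ (pv_items_pairwise l) p hF
    obtain ⟨hslice, hk0nn, hk0lt⟩ := pv_slice_of_prefix f p.1 hppred
    have hk0mem : PySem.Str.len p.1 ∈ PySem.List.pyRange 0 (PySem.Str.len f + 1) 1 :=
      (PySem.List.mem_pyRange_one).mpr ⟨hk0nn, hk0lt⟩
    have hfs : ((pvItems l).reverse.find? (fun q => q.1 == p.1)).isSome :=
      List.find?_isSome.mpr ⟨p, List.mem_reverse.mpr hpmem, by simp⟩
    obtain ⟨pr, hpr⟩ := Option.isSome_iff_exists.mp hfs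
    obtain ⟨hprmem, hprbeq, hprmax⟩ := pv_last_max _ _ (pv_items_pairwise l) pr hpr
    have hpr1 : pr.1 = p.1 := by simpa using hprbeq
    have hle1 : p.2.1 ≤ pr.2.1 := hprmax p hpmem (by simp)
    have hle2 : pr.2.1 ≤ p.2.1 := hpmax pr hprmem (by rw [hpr1]; exact hppred)
    have hpr_eq : pr = p := pv_items_inj l pr p hprmem hpmem (by omega)
    have hcand0 : PySem.Dict.get? d (PySem.Str.slice f none (some (PySem.Str.len p.1))) = some p.2 := by
      rw [hd, hslice, hpr, hpr_eq]
      rfl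
    have hmemC : p.2 ∈ (PySem.List.pyRange 0 (PySem.Str.len f + 1) 1).filterMap
        (fun k => PySem.Dict.get? d (PySem.Str.slice f none (some k))) :=
      List.mem_filterMap.mpr ⟨PySem.Str.len p.1, hk0mem, hcand0⟩
    cases hr : ((PySem.List.pyRange 0 (PySem.Str.len f + 1) 1).filterMap
        (fun k => PySem.Dict.get? d (PySem.Str.slice f none (some k)))).foldl
        (fun b e => match b with
          | none => some e
          | some bb => if e.1 > bb.1 then some e else b) none with
    | none =>
      rcases pv_bf_none _ _ hr with ⟨-, hnil⟩
      rw [hnil] at hmemC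
      simp at hmemC
    | some e =>
      obtain ⟨hem, hub, -⟩ := pv_bf_some _ _ _ hr
      have he : e ∈ (PySem.List.pyRange 0 (PySem.Str.len f + 1) 1).filterMap
          (fun k => PySem.Dict.get? d (PySem.Str.slice f none (some k))) := by
        rcases hem with h | h
        · exact h
        · cases h
      obtain ⟨k, hk, hck⟩ := List.mem_filterMap.mp he
      obtain ⟨q, hqmem, hqpred, hqe⟩ := hsound k e hk hck
      have hqle : q.2.1 ≤ p.2.1 := hpmax q hqmem hqpred
      have hpe : p.2.1 ≤ e.1 := hub p.2 hmemC
      have hq_eq : q = p := by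
        apply pv_items_inj l q p hqmem hpmem
        rw [← hqe] at hpe
        omega
      rw [← hqe, hq_eq]

set_option maxHeartbeats 1000000 in
theorem pv_B_elem (l : List (String × Int)) (f : String) (dflt : Int) :
    (match
      (PySem.List.pyRange 0 (PySem.Str.len f + 1) 1).foldl
        (fun best k =>
          match PySem.Dict.get?
              ((PySem.List.enumerate l 0).foldl
                (fun d p => d.insert (PySem.Str.replace p.2.1 " " "_") (p.1, p.2.2))
                PySem.Dict.empty)
              (PySem.Str.slice f none (some k)), best with
          | some entry, none => some entry
          | some entry, some b => if entry.1 > b.1 then some entry else best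
          | none, _ => best)
        none with
      | none => dflt
      | some b => b.2) = pvVal l f dflt := by
  apply pv_B_core l f dflt
  intro key
  have hfold : (PySem.List.enumerate l 0).foldl
      (fun d p => d.insert (PySem.Str.replace p.2.1 " " "_") (p.1, p.2.2))
      PySem.Dict.empty
      = (pvItems l).foldl (fun d p => d.insert p.1 p.2) PySem.Dict.empty := by
    unfold pvItems
    rw [List.foldl_map]
    simp only [pvNorm]
  rw [hfold, pv_dict_get]
  cases hx : (pvItems l).reverse.find? (fun p => p.1 == key) <;> simp

theorem pv_B_eq (l : List (String × Int)) (feats : List String) (dflt : Int) :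
    generate_full_feature_array_alt l feats dflt = feats.map (fun f => pvVal l f dflt) := by
  unfold generate_full_feature_array_alt
  rw [PySem.List.foldl_append_singleton_eq_map]
  exact List.map_congr_left (fun f _ => pv_B_elem l f dflt)

-- ===== VERDICT (by name: the statement is the Claim_ definition above) =====
theorem generate_full_feature_array_spec : Claim_equal_generate_full_feature_array := by
  intro input_data all_features default_value _
  unfold Spec_generate_full_feature_array
  rw [pv_A_eq, pv_B_eq]
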